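-- pv_equiv track=rewrite | github.com/KirolosMagdyGirgs/ICGR_-_NeuralNetwork | ICGR/iCGR _ final code.py | encodeDNASequence
-- ===== SOURCE A (Python) =====
-- def encodeDNASequence(seq):
--     A = [1, 1]
--     T = [-1, 1]
--     C = [-1, -1]
--     G = [1, -1]
--     a = 0
--     b = 0
--     x = []
--     y = []
--     n = len(seq)
--
--     if seq[0] == 'A':
--         a = int(A[0])
--         b = int(A[1])
--     elif seq[0] == 'T':
--         a = int(T[0])
--         b = int(T[1])
--     elif seq[0] == 'C':
--         a = int(C[0])
--         b = int(C[1])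
--     else:
--         a = int(G[0])
--         b = int(G[1])
--
--     x.append(a)
--     y.append(b)
--
--     for i in range(1, n):
--         if seq[i] == 'A':
--             a = int(x[i - 1]) + (2**i)
--             b = int(y[i - 1]) + (2**i)
--         elif seq[i] == 'T':
--             a = int(x[i - 1]) - (2**i)
--             b = int(y[i - 1]) + (2**i)
--         elif seq[i] == 'C':
--             a = int(x[i - 1]) - (2**i)
--             b = int(y[i - 1]) - (2**i)
--         else:
--             a = int(x[i - 1]) + (2**i)
--             b = int(y[i - 1]) - (2**i)
--
--         x.append(a)
--         y.append(b)
--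
--     x_n = int(x[n - 1])
--     y_n = int(y[n - 1])
--
--     return x_n, y_n, n
-- ===== SOURCE B (Python) =====
-- def encodeDNASequence(seq):
--     n = len(seq)
--     xp = sum(1 << i for i, c in enumerate(seq) if c not in 'TC')
--     yp = sum(1 << i for i, c in enumerate(seq) if c in 'AT')
--     full = (1 << n) - 1
--     return xp - (full - xp), yp - (full - yp), n
-- ===== Notes on version B (the rewrite author's own statement) =====
-- stated objective: simpler
-- what changed: Replaces the stateful loop that grows x/y lists and reads back x[i-1] with two comprehension sums of the positive-sign bit weights plus the complement identity x = xp - ((2^n-1) - xp); no lists, int() conversions or recurrence remain (measurably faster on large inputs).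
import Mathlib
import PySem

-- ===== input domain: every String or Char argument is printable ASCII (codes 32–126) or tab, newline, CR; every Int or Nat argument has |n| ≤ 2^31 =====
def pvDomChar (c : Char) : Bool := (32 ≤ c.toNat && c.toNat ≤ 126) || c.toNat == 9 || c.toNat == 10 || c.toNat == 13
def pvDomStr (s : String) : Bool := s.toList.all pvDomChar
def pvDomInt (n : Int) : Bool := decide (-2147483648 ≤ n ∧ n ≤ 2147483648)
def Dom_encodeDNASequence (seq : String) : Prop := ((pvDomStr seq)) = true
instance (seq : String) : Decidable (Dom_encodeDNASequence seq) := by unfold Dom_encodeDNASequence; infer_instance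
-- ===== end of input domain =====

-- B replaces A's list-growing loop by two direct sums of positive bit weights and a
-- complement identity; equivalence of return values is proved on all non-empty strings.

-- ===== PORT A =====
-- loop body of 'for i in range(1, n)': reads x[i-1]/y[i-1] (always in range when the
-- loop runs, so pyGetD with default 0 is exact), appends the new coordinates
def stepA (seq : String) (st : List Int × List Int) (i : Int) : List Int × List Int :=
  let xi := PySem.List.pyGetD st.1 (i - 1) 0
  let yi := PySem.List.pyGetD st.2 (i - 1) 0
  let c := PySem.Str.pyGet? seq i
  let ab : Int × Int :=
    if c = some 'A' then (xi + 2 ^ i.toNat, yi + 2 ^ i.toNat)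
    else if c = some 'T' then (xi - 2 ^ i.toNat, yi + 2 ^ i.toNat)
    else if c = some 'C' then (xi - 2 ^ i.toNat, yi - 2 ^ i.toNat)
    else (xi + 2 ^ i.toNat, yi - 2 ^ i.toNat)
  (st.1 ++ [ab.1], st.2 ++ [ab.2])

def encodeDNASequence (seq : String) : Int × Int × Int :=
  let n : Int := PySem.Str.len seq
  let c0 := PySem.Str.pyGet? seq 0          -- seq[0]: IndexError on "" (excluded by Pre_)
  let ab : Int × Int :=
    if c0 = some 'A' then (1, 1)
    else if c0 = some 'T' then (-1, 1)
    else if c0 = some 'C' then (-1, -1)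
    else (1, -1)
  let xy := (PySem.List.pyRange 1 n 1).foldl (stepA seq) ([ab.1], [ab.2])
  (PySem.List.pyGetD xy.1 (n - 1) 0, PySem.List.pyGetD xy.2 (n - 1) 0, n)

-- ===== PORT B =====
def encodeDNASequence_alt (seq : String) : Int × Int × Int :=
  let cs := seq.toList
  let n := cs.length
  let xp : Int := (((PySem.List.enumerate cs 0).filter
      (fun p => !(p.2 = 'T' ∨ p.2 = 'C'))).map (fun p => (2 : Int) ^ p.1.toNat)).sum
  let yp : Int := (((PySem.List.enumerate cs 0).filter
      (fun p => (p.2 = 'A' ∨ p.2 = 'T' : Bool))).map (fun p => (2 : Int) ^ p.1.toNat)).sum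
  let full : Int := 2 ^ n - 1
  (xp - (full - xp), yp - (full - yp), (n : Int))

-- ===== PRECONDITION & SPEC =====
def Pre_encodeDNASequence (seq : String) : Prop := seq.toList ≠ []
instance (seq : String) : Decidable (Pre_encodeDNASequence seq) := by
  unfold Pre_encodeDNASequence; infer_instance
def pvWitness_encodeDNASequence : String := "ACGT"

def Spec_encodeDNASequence (seq : String) (out : Int × Int × Int) : Prop :=
  out = encodeDNASequence_alt seq
instance (seq : String) (out : Int × Int × Int) : Decidable (Spec_encodeDNASequence seq out) := by
  unfold Spec_encodeDNASequence; infer_instance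

-- ===== CLAIM (what is proved, stated in full; the proofs are below) =====
def Claim_equal_encodeDNASequence : Prop := ∀ (seq : String), Dom_encodeDNASequence seq →
  Pre_encodeDNASequence seq → Spec_encodeDNASequence seq (encodeDNASequence seq)

-- ===== LEMMAS AND PROOFS =====

-- per-character coordinate signs (branch order as in A)
def sx (c : Char) : Int := if c = 'A' then 1 else if c = 'T' then -1 else if c = 'C' then -1 else 1
def sy (c : Char) : Int := if c = 'A' then 1 else if c = 'T' then 1 else if c = 'C' then -1 else -1

-- the weighted sign sums both programs compute, structurally on the character list
def specFold (cs : List Char) (i : Nat) : Int × Int :=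
  match cs with
  | [] => (0, 0)
  | c :: r =>
    let p := specFold r (i + 1)
    (sx c * 2 ^ i + p.1, sy c * 2 ^ i + p.2)

theorem specFold_append (l : List Char) (c : Char) (i : Nat) :
    specFold (l ++ [c]) i =
      ((specFold l i).1 + sx c * 2 ^ (i + l.length),
       (specFold l i).2 + sy c * 2 ^ (i + l.length)) := by
  induction l generalizing i with
  | nil => simp [specFold]
  | cons d r ih => simp [specFold, ih (i + 1)]; constructor <;> ring

-- ===== B-side characterisation =====

theorem b_sum_x (cs : List Char) (s : Nat) :
    2 * (((PySem.List.enumerate cs (s : Int)).filter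
      (fun p => !(p.2 = 'T' ∨ p.2 = 'C'))).map (fun p => (2 : Int) ^ p.1.toNat)).sum
      - (2 ^ cs.length - 1) * 2 ^ s = (specFold cs s).1 := by
  induction cs generalizing s with
  | nil => simp [specFold]
  | cons c r ih =>
    have h := ih (s + 1)
    push_cast at h
    simp at h
    by_cases hT : c = 'T'
    · simp [PySem.List.enumerate_cons, List.filter_cons, specFold, sx, hT]
      linear_combination h
    · by_cases hC : c = 'C'
      · simp [PySem.List.enumerate_cons, List.filter_cons, specFold, sx, hT, hC]
        linear_combination h
      · simp [PySem.List.enumerate_cons, List.filter_cons, specFold, sx, hT, hC]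
        linear_combination h

theorem b_sum_y (cs : List Char) (s : Nat) :
    2 * (((PySem.List.enumerate cs (s : Int)).filter
      (fun p => (p.2 = 'A' ∨ p.2 = 'T' : Bool))).map (fun p => (2 : Int) ^ p.1.toNat)).sum
      - (2 ^ cs.length - 1) * 2 ^ s = (specFold cs s).2 := by
  induction cs generalizing s with
  | nil => simp [specFold]
  | cons c r ih =>
    have h := ih (s + 1)
    push_cast at h
    simp at h
    by_cases hA : c = 'A'
    · simp [PySem.List.enumerate_cons, List.filter_cons, specFold, sy, hA]
      linear_combination h
    · by_cases hT : c = 'T'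
      · simp [PySem.List.enumerate_cons, List.filter_cons, specFold, sy, hA, hT]
        linear_combination h
      · simp [PySem.List.enumerate_cons, List.filter_cons, specFold, sy, hA, hT]
        linear_combination h

theorem alt_eq_spec (seq : String) :
    encodeDNASequence_alt seq =
      ((specFold seq.toList 0).1, (specFold seq.toList 0).2, (seq.toList.length : Int)) := by
  have hx := b_sum_x seq.toList 0
  have hy := b_sum_y seq.toList 0
  push_cast at hx hy
  simp at hx hy
  simp only [encodeDNASequence_alt, Prod.mk.injEq]
  refine ⟨?_, ?_, trivial⟩
  · simp
    linear_combination hx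
  · simp
    linear_combination hy

-- ===== A-side characterisation =====

-- the x/y coordinate after the first m characters (what A stores in x[m-1]/y[m-1])
def XP (cs : List Char) (m : Nat) : Int := (specFold (cs.take m) 0).1
def YP (cs : List Char) (m : Nat) : Int := (specFold (cs.take m) 0).2

theorem XP_succ (cs : List Char) (k : Nat) (hk : k < cs.length) :
    XP cs (k + 1) = XP cs k + sx cs[k] * 2 ^ k ∧
    YP cs (k + 1) = YP cs k + sy cs[k] * 2 ^ k := by
  have ht : cs.take (k + 1) = cs.take k ++ [cs[k]] := by
    rw [List.take_add_one]
    simp [List.getElem?_eq_getElem hk]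
  have hl : (cs.take k).length = k := List.length_take_of_le (Nat.le_of_lt hk)
  unfold XP YP
  rw [ht, specFold_append, hl]
  simp

theorem loop_inv (seq : String) (k : Nat) (h1 : 1 ≤ k) (h2 : k ≤ seq.toList.length) :
    (PySem.List.pyRange 1 (k : Int) 1).foldl (stepA seq)
        ([XP seq.toList 1], [YP seq.toList 1]) =
      ((List.range k).map (fun j => XP seq.toList (j + 1)),
       (List.range k).map (fun j => YP seq.toList (j + 1))) := by
  induction k with
  | zero => omega
  | succ k ih =>
    by_cases hk1 : k = 0
    · subst hk1
      rw [PySem.List.pyRange_one_eq_nil (by norm_num)]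
      simp [XP, YP]
    · have hk : 1 ≤ k := by omega
      have hkl : k < seq.toList.length := by omega
      have hsplit : PySem.List.pyRange 1 ((k : Int) + 1) =
          PySem.List.pyRange 1 (k : Int) ++ [(k : Int)] :=
        PySem.List.pyRange_one_succ_right (by exact_mod_cast hk)
      push_cast
      rw [hsplit, List.foldl_append, ih hk (by omega)]
      unfold stepA
      have hxg : PySem.List.pyGetD ((List.range k).map (fun j => XP seq.toList (j + 1)))
          ((k : Int) - 1) 0 = XP seq.toList k := by
        have : ((k : Int) - 1) = ((k - 1 : Nat) : Int) := by omega
        rw [this, PySem.List.pyGetD_natCast,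
          PySem.List.getD_map_range _ _ _ _ (by omega : k - 1 < k)]
        congr 1
        omega
      have hyg : PySem.List.pyGetD ((List.range k).map (fun j => YP seq.toList (j + 1)))
          ((k : Int) - 1) 0 = YP seq.toList k := by
        have : ((k : Int) - 1) = ((k - 1 : Nat) : Int) := by omega
        rw [this, PySem.List.pyGetD_natCast,
          PySem.List.getD_map_range _ _ _ _ (by omega : k - 1 < k)]
        congr 1
        omega
      have hc : PySem.Str.pyGet? seq (k : Int) = some seq.toList[k] := by
        rw [PySem.Str.pyGet?_natCast]
        exact List.getElem?_eq_getElem hkl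
      have htn : ((k : Int)).toNat = k := Int.toNat_natCast k
      have hstep := XP_succ seq.toList k hkl
      have hck : seq.toList[k]? = some seq.toList[k] := List.getElem?_eq_getElem hkl
      simp only [hxg, hyg, hc, hck, htn, List.range_succ, List.map_append, List.map_cons,
        List.map_nil, Option.some.injEq]
      by_cases hA : seq.toList[k] = 'A'
      · simp [hA, hck, hxg, hyg, hstep.1, hstep.2, sx, sy, ← sub_eq_add_neg]
      · by_cases hT : seq.toList[k] = 'T'
        · simp [hT, hA, hck, hxg, hyg, hstep.1, hstep.2, sx, sy, ← sub_eq_add_neg]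
        · by_cases hC : seq.toList[k] = 'C'
          · simp [hC, hA, hT, hck, hxg, hyg, hstep.1, hstep.2, sx, sy, ← sub_eq_add_neg]
          · simp [hA, hT, hC, hck, hxg, hyg, hstep.1, hstep.2, sx, sy, ← sub_eq_add_neg]

theorem a_eq_spec (seq : String) (h : seq.toList ≠ []) :
    encodeDNASequence seq =
      ((specFold seq.toList 0).1, (specFold seq.toList 0).2, (seq.toList.length : Int)) := by
  obtain ⟨c0, r, hcs⟩ := List.exists_cons_of_ne_nil h
  have hn : 1 ≤ seq.toList.length := by rw [hcs]; simp
  have hlen : PySem.Str.len seq = (seq.toList.length : Int) := by simp [PySem.Str.len]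
  have hc0 : PySem.Str.pyGet? seq 0 = some c0 := by
    have := PySem.Str.pyGet?_natCast seq 0
    simp only [Nat.cast_zero] at this
    rw [this, hcs]; rfl
  have hinit : XP seq.toList 1 = sx c0 ∧ YP seq.toList 1 = sy c0 := by
    unfold XP YP
    rw [hcs]
    simp [specFold]
  have hinv := loop_inv seq seq.toList.length hn (le_refl _)
  unfold encodeDNASequence
  rw [hlen]
  have hab : (if PySem.Str.pyGet? seq 0 = some 'A' then ((1 : Int), (1 : Int))
      else if PySem.Str.pyGet? seq 0 = some 'T' then (-1, 1)
      else if PySem.Str.pyGet? seq 0 = some 'C' then (-1, -1)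
      else (1, -1)) = (sx c0, sy c0) := by
    rw [hc0]
    by_cases hA : c0 = 'A'
    · simp [hA, sx, sy]
    · by_cases hT : c0 = 'T'
      · simp [hT, hA, sx, sy]
      · by_cases hC : c0 = 'C'
        · simp [hC, hA, hT, sx, sy]
        · simp [hA, hT, hC, sx, sy]
  simp only [hab]
  rw [← hinit.1, ← hinit.2, hinv]
  have hget : ∀ (f : Nat → Int), PySem.List.pyGetD
      ((List.range seq.toList.length).map f) ((seq.toList.length : Int) - 1) 0 =
      f (seq.toList.length - 1) := by
    intro f
    have : ((seq.toList.length : Int) - 1) = ((seq.toList.length - 1 : Nat) : Int) := by omega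
    rw [this, PySem.List.pyGetD_natCast,
      PySem.List.getD_map_range _ _ _ _ (by omega)]
  simp only [hget]
  have hfin : seq.toList.length - 1 + 1 = seq.toList.length := by omega
  rw [hfin]
  unfold XP YP
  rw [List.take_length]

-- ===== VERDICT (by name: the statement is the Claim_ definition above) =====
theorem encodeDNASequence_spec : Claim_equal_encodeDNASequence := by
  intro seq _ hpre
  unfold Spec_encodeDNASequence
  rw [a_eq_spec seq hpre, alt_eq_spec seq]
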